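-- pv_equiv track=rewrite | github.com/stevepryde/spnaughts | games/naughts/bots/bot_base.py | get_unrotated_move
-- ===== SOURCE A (Python) =====
-- def get_unrotated_move(move, rotations):
--     """
--     Return the correct, unrotated move.
--
--     The returned move corresponds to the move we would make on a board
--     rotated the specified number of times.
--     For example, if rotations is 1, and I want to get the corrected move
--     for move 0, this would return 6. If rotations is 2, and I want the
--     corrected move for 1, this would return 7.
--
--     :param move: The move to make.
--     :param rotations: The number of 90 degree rotations, in a clockwise
--         direction.
--     :returns: The move, rotated anti-clockwise by the number of specified
--         rotations.
--     """
--     rotations = int(rotations) % 4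
--
--     # Don't do anything if we don't have to.
--     if rotations == 0:
--         return int(move)
--
--     transform_map = [6, 3, 0, 7, 4, 1, 8, 5, 2]
--     for _ in range(rotations):
--         move = transform_map[int(move)]
--
--     return move
-- ===== SOURCE B (Python) =====
-- _T1 = [6, 3, 0, 7, 4, 1, 8, 5, 2]
-- _T2 = [_T1[i] for i in _T1]
-- _T3 = [_T2[i] for i in _T1]
-- _TABLES = [None, _T1, _T2, _T3]
--
--
-- def get_unrotated_move(move, rotations):
--     rotations = int(rotations) % 4
--     if rotations == 0:
--         return int(move)
--     return _TABLES[rotations][int(move)]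
-- ===== Notes on version B (the rewrite author's own statement) =====
-- stated objective: simpler
-- what changed: The per-call loop over transform_map is replaced by module-level precomputed composed permutation tables for 1, 2 and 3 rotations, so the function body is a single indexed lookup.
import Mathlib
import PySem

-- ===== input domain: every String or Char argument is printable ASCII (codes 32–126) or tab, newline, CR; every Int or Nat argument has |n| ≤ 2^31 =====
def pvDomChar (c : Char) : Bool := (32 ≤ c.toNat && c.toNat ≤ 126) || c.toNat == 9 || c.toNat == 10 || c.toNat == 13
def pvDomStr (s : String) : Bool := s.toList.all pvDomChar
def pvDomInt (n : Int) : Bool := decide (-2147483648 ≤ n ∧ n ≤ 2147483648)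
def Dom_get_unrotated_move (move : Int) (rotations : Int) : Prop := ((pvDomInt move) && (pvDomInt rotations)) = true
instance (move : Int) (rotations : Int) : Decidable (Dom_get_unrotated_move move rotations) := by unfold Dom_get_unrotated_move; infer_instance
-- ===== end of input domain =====

-- B replaces A's per-call rotation loop by precomputed composed permutation tables (one lookup); objective: simpler.


-- ===== PORT A =====
def get_unrotated_move (move : Int) (rotations : Int) : Int :=
  let r := PySem.Int.mod rotations 4
  if r = 0 then move
  else
    (PySem.List.pyRange 0 r 1).foldl
      (fun m _ => PySem.List.pyGetD [6, 3, 0, 7, 4, 1, 8, 5, 2] m 0) move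

-- ===== PORT B =====
def pvT1 : List Int := [6, 3, 0, 7, 4, 1, 8, 5, 2]
def pvT2 : List Int := pvT1.map (fun i => PySem.List.pyGetD pvT1 i 0)
def pvT3 : List Int := pvT1.map (fun i => PySem.List.pyGetD pvT2 i 0)
-- Python's _TABLES[0] is None (never indexed, since r ∈ {1,2,3} here); ported as [].
def pvTables : List (List Int) := [[], pvT1, pvT2, pvT3]

def get_unrotated_move_alt (move : Int) (rotations : Int) : Int :=
  let r := PySem.Int.mod rotations 4
  if r = 0 then move
  else PySem.List.pyGetD (PySem.List.pyGetD pvTables r []) move 0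

-- ===== PRECONDITION & SPEC =====
-- Pre_ excludes the inputs on which A raises IndexError: move outside Python index range
-- [-9, 8] of the 9-element transform_map, when at least one rotation is performed.
def Pre_get_unrotated_move (move : Int) (rotations : Int) : Prop :=
  PySem.Int.mod rotations 4 = 0 ∨ (-9 ≤ move ∧ move ≤ 8)
instance (move : Int) (rotations : Int) : Decidable (Pre_get_unrotated_move move rotations) := by
  unfold Pre_get_unrotated_move; infer_instance

def pvWitness_get_unrotated_move : Int × Int := (5, 3)

def Spec_get_unrotated_move (move : Int) (rotations : Int) (out : Int) : Prop := out = get_unrotated_move_alt move rotations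
instance (move : Int) (rotations : Int) (out : Int) : Decidable (Spec_get_unrotated_move move rotations out) := by unfold Spec_get_unrotated_move; infer_instance

-- ===== CLAIM (what is proved, stated in full; the proofs are below) =====
def Claim_equal_get_unrotated_move : Prop := ∀ (move : Int) (rotations : Int), Dom_get_unrotated_move move rotations → Pre_get_unrotated_move move rotations → Spec_get_unrotated_move move rotations (get_unrotated_move move rotations)

-- ===== LEMMAS AND PROOFS =====
lemma pv_key (r move : Int) (h0 : 0 ≤ r) (h4 : r < 4)
    (hm : r = 0 ∨ (-9 ≤ move ∧ move ≤ 8)) :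
    (if r = 0 then move
     else (PySem.List.pyRange 0 r 1).foldl
       (fun m _ => PySem.List.pyGetD [6, 3, 0, 7, 4, 1, 8, 5, 2] m 0) move)
    = (if r = 0 then move
       else PySem.List.pyGetD (PySem.List.pyGetD pvTables r []) move 0) := by
  by_cases hr : r = 0
  · simp [hr]
  · obtain ⟨h1, h2⟩ := hm.resolve_left hr
    interval_cases r
    · exact absurd rfl hr
    all_goals interval_cases move <;> decide

-- ===== VERDICT (by name: the statement is the Claim_ definition above) =====

theorem get_unrotated_move_spec : Claim_equal_get_unrotated_move := by
  intro move rotations _ hpre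
  unfold Spec_get_unrotated_move get_unrotated_move get_unrotated_move_alt
  have h0 : 0 ≤ PySem.Int.mod rotations 4 := by
    rw [PySem.Int.mod_eq_emod_of_pos (by omega)]; omega
  have h4 : PySem.Int.mod rotations 4 < 4 := by
    rw [PySem.Int.mod_eq_emod_of_pos (by omega)]; omega
  exact pv_key _ move h0 h4 hpre
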